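-- pv_equiv track=rewrite | github.com/Enoch-H-Kang/reasonably_reasoning | run_ps_br_games.py | collusion_abreu_punishment_timer
-- ===== SOURCE A (Python) =====
-- from typing import List, Optional, Tuple
--
-- def collusion_abreu_punishment_timer(
--     self_history_actions: List[str],
--     opp_history_actions: List[str],
-- ) -> int:
--     if len(self_history_actions) != len(opp_history_actions):
--         raise ValueError("self_history_actions and opp_history_actions must have equal length")
--
--     punish_remaining = 0
--     for self_action, opp_action in zip(self_history_actions, opp_history_actions):
--         if punish_remaining > 0:
--             punish_remaining -= 1
--             continue
--         if self_action != "K" or opp_action != "K":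
--             punish_remaining = 2
--     return punish_remaining
-- ===== SOURCE B (Python) =====
-- def collusion_abreu_punishment_timer(self_history_actions, opp_history_actions):
--     if len(self_history_actions) != len(opp_history_actions):
--         raise ValueError("self_history_actions and opp_history_actions must have equal length")
--     i, n = 0, len(self_history_actions)
--     while i < n:
--         if self_history_actions[i] != "K" or opp_history_actions[i] != "K":
--             i += 3  # skip the deviation plus the two punishment rounds it triggers
--         else:
--             i += 1
--     return max(0, i - n)
-- ===== Notes on version B (the rewrite author's own statement) =====
-- stated objective: alternative
-- what changed: Replaced the per-step punishment-counter decrement loop with an index-skipping window scan: on a deviation the index jumps 3 positions, and the residual timer is recovered as max(0, i - n) overshoot.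
import Mathlib
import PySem

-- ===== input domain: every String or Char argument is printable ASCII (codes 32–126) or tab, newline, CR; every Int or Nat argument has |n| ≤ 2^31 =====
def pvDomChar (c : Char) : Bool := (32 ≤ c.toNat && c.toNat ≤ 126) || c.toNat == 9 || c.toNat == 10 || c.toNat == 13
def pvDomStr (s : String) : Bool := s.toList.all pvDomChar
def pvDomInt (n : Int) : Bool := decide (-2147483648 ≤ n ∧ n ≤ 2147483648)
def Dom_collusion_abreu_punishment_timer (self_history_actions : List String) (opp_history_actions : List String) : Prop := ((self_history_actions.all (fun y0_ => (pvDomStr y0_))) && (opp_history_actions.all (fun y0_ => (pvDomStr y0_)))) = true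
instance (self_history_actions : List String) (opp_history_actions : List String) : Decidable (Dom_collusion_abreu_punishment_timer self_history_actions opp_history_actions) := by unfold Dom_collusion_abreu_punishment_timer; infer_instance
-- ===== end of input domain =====

-- B replaces A's punishment-counter decrement loop by an index-skipping window scan
-- (jump 3 on a deviation, recover the residual timer as max(0, i-n)); objective: alternative.
-- A raises ValueError on unequal-length histories; Pre_ excludes exactly those inputs.

-- ===== PORT A =====
-- fold over zip(self, opp) carrying the punish_remaining counter, exactly A's loop
def collusion_abreu_punishment_timer (self_history_actions : List String) (opp_history_actions : List String) : Int :=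
  (List.zip self_history_actions opp_history_actions).foldl
    (fun punish_remaining p =>
      if punish_remaining > 0 then punish_remaining - 1
      else if p.1 ≠ "K" ∨ p.2 ≠ "K" then 2 else punish_remaining) 0

-- ===== PORT B =====
-- B's while loop: index i advances by 3 on a deviation window, else by 1; recursion on n - i.
-- (s[i] is read only after the i < n check, so getD with a dummy default is exact here.)
def pvAltGo (s o : List String) (n i : Nat) : Int :=
  if _h : i < n then
    if s.getD i "" ≠ "K" ∨ o.getD i "" ≠ "K" then pvAltGo s o n (i + 3)
    else pvAltGo s o n (i + 1)
  else max 0 ((i : Int) - (n : Int))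
termination_by n - i
decreasing_by all_goals omega

def collusion_abreu_punishment_timer_alt (self_history_actions : List String) (opp_history_actions : List String) : Int :=
  pvAltGo self_history_actions opp_history_actions self_history_actions.length 0

-- ===== PRECONDITION & SPEC =====
-- A raises ValueError when the two histories have different lengths; exactly those inputs are excluded.
def Pre_collusion_abreu_punishment_timer (self_history_actions : List String) (opp_history_actions : List String) : Prop :=
  self_history_actions.length = opp_history_actions.length
instance (self_history_actions : List String) (opp_history_actions : List String) : Decidable (Pre_collusion_abreu_punishment_timer self_history_actions opp_history_actions) := by unfold Pre_collusion_abreu_punishment_timer; infer_instance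

def pvWitness_collusion_abreu_punishment_timer : List String × List String := (["K", "D", "K"], ["K", "K", "K"])

def Spec_collusion_abreu_punishment_timer (self_history_actions : List String) (opp_history_actions : List String) (out : Int) : Prop := out = collusion_abreu_punishment_timer_alt self_history_actions opp_history_actions
instance (self_history_actions : List String) (opp_history_actions : List String) (out : Int) : Decidable (Spec_collusion_abreu_punishment_timer self_history_actions opp_history_actions out) := by unfold Spec_collusion_abreu_punishment_timer; infer_instance

-- ===== CLAIM (what is proved, stated in full; the proofs are below) =====
def Claim_equal_collusion_abreu_punishment_timer : Prop := ∀ (self_history_actions : List String) (opp_history_actions : List String), Dom_collusion_abreu_punishment_timer self_history_actions opp_history_actions → Pre_collusion_abreu_punishment_timer self_history_actions opp_history_actions → Spec_collusion_abreu_punishment_timer self_history_actions opp_history_actions (collusion_abreu_punishment_timer self_history_actions opp_history_actions)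

-- ===== LEMMAS AND PROOFS =====

-- A's loop body as a named step function (definitionally the fold body of the A port)
def pvStepA (r : Int) (p : String × String) : Int :=
  if r > 0 then r - 1 else if p.1 ≠ "K" ∨ p.2 ≠ "K" then 2 else r

lemma pvA_eq_fold (s o : List String) :
    collusion_abreu_punishment_timer s o = (List.zip s o).foldl pvStepA 0 := rfl

lemma pvZipDrop : ∀ (k : Nat) (l m : List String),
    (l.zip m).drop k = (l.drop k).zip (m.drop k) := by
  intro k
  induction k with
  | zero => intro l m; simp
  | succ k ih =>
    intro l m
    cases l with
    | nil => simp
    | cons a l' =>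
      cases m with
      | nil => simp
      | cons b m' => simpa using ih l' m'

-- the main bridge: B's index scan from position i equals A's counter fold over the suffix
lemma pvBridge : ∀ (k : Nat) (s o : List String) (i : Nat),
    s.length = o.length → s.length - i ≤ k → i ≤ s.length →
    pvAltGo s o s.length i = ((s.drop i).zip (o.drop i)).foldl pvStepA 0 := by
  intro k
  induction k with
  | zero =>
    intro s o i hlen hk hi
    have hin : i = s.length := by omega
    rw [pvAltGo]
    simp [hin, List.drop_length]
  | succ k ih =>
    intro s o i hlen hk hi
    by_cases h : i < s.length
    · have ho : i < o.length := by omega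
      have hds : s.drop i = s[i] :: s.drop (i + 1) := List.drop_eq_getElem_cons h
      have hdo : o.drop i = o[i] :: o.drop (i + 1) := List.drop_eq_getElem_cons ho
      rw [pvAltGo, dif_pos h, List.getD_eq_getElem s "" h, List.getD_eq_getElem o "" ho,
        hds, hdo]
      by_cases hdev : s[i] ≠ "K" ∨ o[i] ≠ "K"
      · rw [if_pos hdev]
        -- RHS: first fold step yields counter 2
        have hstep0 : pvStepA 0 (s[i], o[i]) = 2 := by
          simp [pvStepA, hdev]
        simp only [List.zip_cons_cons, List.foldl_cons, hstep0]
        rcases hrest : (s.drop (i + 1)).zip (o.drop (i + 1)) with _ | ⟨a, _ | ⟨b, t⟩⟩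
        · -- suffix exhausted: n = i + 1, overshoot 2
          have hl : s.length - (i + 1) = 0 := by
            have := congrArg List.length hrest
            simpa [hlen] using this
          rw [pvAltGo, dif_neg (by omega : ¬ (i + 3 < s.length)), List.foldl_nil]
          omega
        · -- one element left: n = i + 2, overshoot 1
          have hl : s.length - (i + 1) = 1 := by
            have := congrArg List.length hrest
            simpa [hlen] using this
          rw [pvAltGo, dif_neg (by omega : ¬ (i + 3 < s.length))]
          have ha : pvStepA 2 a = 1 := by simp [pvStepA]
          rw [List.foldl_cons, ha, List.foldl_nil]
          omega
        · -- at least two left: the two punishment steps consume a and b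
          have hl : 2 ≤ s.length - (i + 1) := by
            have := congrArg List.length hrest
            simp [hlen] at this
            omega
          have ht : t = (s.drop (i + 3)).zip (o.drop (i + 3)) := by
            have : ((s.drop (i + 1)).zip (o.drop (i + 1))).drop 2
                = (s.drop (i + 3)).zip (o.drop (i + 3)) := by
              rw [pvZipDrop, List.drop_drop, List.drop_drop]
            rw [hrest] at this
            simpa using this
          have ha : pvStepA 2 a = 1 := by simp [pvStepA]
          have hb : pvStepA 1 b = 0 := by simp [pvStepA]
          have hrec := ih s o (i + 3) hlen (by omega) (by omega)
          rw [List.foldl_cons, ha, List.foldl_cons, hb, ht, hrec]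
      · rw [if_neg hdev]
        rw [not_or, not_not, not_not] at hdev
        have hstep0 : pvStepA 0 (s[i], o[i]) = 0 := by
          simp [pvStepA, hdev.1, hdev.2]
        have hrec := ih s o (i + 1) hlen (by omega) (by omega)
        rw [List.zip_cons_cons, List.foldl_cons, hstep0, hrec]
    · have hin : i = s.length := by omega
      rw [pvAltGo]
      simp [hin, List.drop_length]

-- ===== VERDICT (by name: the statement is the Claim_ definition above) =====
theorem collusion_abreu_punishment_timer_spec : Claim_equal_collusion_abreu_punishment_timer := by
  intro s o _hdom hpre
  unfold Spec_collusion_abreu_punishment_timer collusion_abreu_punishment_timer_alt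
  rw [pvA_eq_fold]
  have := pvBridge s.length s o 0 hpre (by omega) (by omega)
  simpa using this.symm
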